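-- pv_equiv track=rewrite | github.com/NimoRotem/genomeClaw | backend/api/files.py | _detect_quality_encoding
-- ===== SOURCE A (Python) =====
-- def _detect_quality_encoding(quality_line: str) -> str:
--     """Detect FASTQ quality encoding from a quality string.
--
--     Phred+33 (Sanger/Illumina 1.8+): chars from '!' (33) to '~' (126)
--     Phred+64 (Illumina 1.3-1.7): chars from '@' (64) to '~' (126)
--     """
--     if not quality_line:
--         return "unknown"
--     min_ord = min(ord(c) for c in quality_line)
--     if min_ord < 59:  # Below ';' strongly suggests Phred+33
--         return "Phred+33 (Sanger/Illumina 1.8+)"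
--     elif min_ord >= 64:
--         return "Phred+64 (Illumina 1.3-1.7)"
--     else:
--         return "ambiguous (likely Phred+33)"
-- ===== SOURCE B (Python) =====
-- _LABELS = ("Phred+33 (Sanger/Illumina 1.8+)",
--            "ambiguous (likely Phred+33)",
--            "Phred+64 (Illumina 1.3-1.7)")
--
--
-- def _char_class(c):
--     o = ord(c)
--     return 0 if o < 59 else (1 if o < 64 else 2)
--
--
-- def _min_class(s, lo, hi):
--     """Smallest encoding class on s[lo:hi] by divide and conquer."""
--     if hi - lo <= 1:
--         return _char_class(s[lo])
--     mid = (lo + hi) // 2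
--     return min(_min_class(s, lo, mid), _min_class(s, mid, hi))
--
--
-- def _detect_quality_encoding(quality_line: str) -> str:
--     if not quality_line:
--         return "unknown"
--     return _LABELS[_min_class(quality_line, 0, len(quality_line))]
-- ===== Notes on version B (the rewrite author's own statement) =====
-- stated objective: alternative
-- what changed: Replaces the linear min-of-codes scan and threshold branch chain by a divide-and-conquer recursion that maps each character to an encoding class (0/1/2) and combines halves with min, then indexes a label table by the resulting class.
import Mathlib
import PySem

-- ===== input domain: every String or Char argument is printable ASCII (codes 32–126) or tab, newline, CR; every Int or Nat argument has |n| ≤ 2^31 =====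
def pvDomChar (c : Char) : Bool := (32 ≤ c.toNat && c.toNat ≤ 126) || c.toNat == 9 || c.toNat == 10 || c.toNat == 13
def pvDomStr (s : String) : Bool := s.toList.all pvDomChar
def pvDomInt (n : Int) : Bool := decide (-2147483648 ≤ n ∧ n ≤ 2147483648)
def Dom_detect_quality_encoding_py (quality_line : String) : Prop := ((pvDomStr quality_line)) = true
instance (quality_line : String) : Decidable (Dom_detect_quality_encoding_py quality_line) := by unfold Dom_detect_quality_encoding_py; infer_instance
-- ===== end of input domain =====

-- B replaces the linear min-of-codes scan by a divide-and-conquer recursion over encoding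
-- classes (0/1/2) combined with min, indexing a label table (objective: alternative).

-- ===== PORT A =====
-- A: empty → "unknown"; else min of ord over the chars, compared with the thresholds.
def detect_quality_encoding_py (quality_line : String) : String :=
  match quality_line.toList with
  | [] => "unknown"
  | c :: cs =>
    let min_ord := cs.foldl (fun m d => min m d.toNat) c.toNat
    if min_ord < 59 then "Phred+33 (Sanger/Illumina 1.8+)"
    else if 64 ≤ min_ord then "Phred+64 (Illumina 1.3-1.7)"
    else "ambiguous (likely Phred+33)"

-- ===== PORT B =====
def pvLabels : List String :=
  ["Phred+33 (Sanger/Illumina 1.8+)", "ambiguous (likely Phred+33)", "Phred+64 (Illumina 1.3-1.7)"]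

def pvCharClass (c : Char) : Nat :=
  if c.toNat < 59 then 0 else if c.toNat < 64 then 1 else 2

-- Python's s[lo] is ported as getD: within B's recursion lo < hi ≤ len always holds,
-- so the index is in range and the default is never used.
def pvMinClass (l : List Char) (lo hi : Nat) : Nat :=
  if hi - lo ≤ 1 then pvCharClass (l.getD lo default)
  else min (pvMinClass l lo ((lo + hi) / 2)) (pvMinClass l ((lo + hi) / 2) hi)
termination_by hi - lo
decreasing_by all_goals omega

def detect_quality_encoding_py_alt (quality_line : String) : String :=
  if quality_line.toList.isEmpty then "unknown"
  else pvLabels.getD (pvMinClass quality_line.toList 0 quality_line.toList.length) ""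

-- ===== PRECONDITION & SPEC =====
def Spec_detect_quality_encoding_py (quality_line : String) (out : String) : Prop := out = detect_quality_encoding_py_alt quality_line
instance (quality_line : String) (out : String) : Decidable (Spec_detect_quality_encoding_py quality_line out) := by unfold Spec_detect_quality_encoding_py; infer_instance

-- ===== CLAIM (what is proved, stated in full; the proofs are below) =====
def Claim_equal_detect_quality_encoding_py : Prop := ∀ (quality_line : String), Dom_detect_quality_encoding_py quality_line → Spec_detect_quality_encoding_py quality_line (detect_quality_encoding_py quality_line)

-- ===== LEMMAS AND PROOFS =====

-- Class-min over a whole list, with 2 (the top class) as the fold's identity.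
def pvF (xs : List Char) : Nat := xs.foldl (fun m c => min m (pvCharClass c)) 2

theorem pvCharClass_le_two (c : Char) : pvCharClass c ≤ 2 := by
  unfold pvCharClass; split_ifs <;> omega

theorem pvCharClass_eq_zero (c : Char) : (pvCharClass c = 0) ↔ c.toNat < 59 := by
  unfold pvCharClass; split_ifs <;> simp_all

theorem pvCharClass_eq_two (c : Char) : (pvCharClass c = 2) ↔ 64 ≤ c.toNat := by
  unfold pvCharClass; split_ifs <;> simp_all; omega

theorem pvF_shift (xs : List Char) (a : Nat) (h : a ≤ 2) :
    xs.foldl (fun m c => min m (pvCharClass c)) a = min a (pvF xs) := by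
  induction xs generalizing a with
  | nil => simp [pvF]; omega
  | cons c xs ih =>
    have hc := pvCharClass_le_two c
    rw [List.foldl_cons, ih _ (by omega)]
    have : pvF (c :: xs) = min (pvCharClass c) (pvF xs) := by
      unfold pvF; rw [List.foldl_cons, ih _ (by omega)]
      congr 1; omega
    rw [this]; omega

theorem pvF_le_two (xs : List Char) : pvF xs ≤ 2 := by
  have := pvF_shift xs 2 (le_refl 2)
  unfold pvF at *; omega

theorem pvF_cons (c : Char) (xs : List Char) :
    pvF (c :: xs) = min (pvCharClass c) (pvF xs) := by
  unfold pvF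
  rw [List.foldl_cons, pvF_shift xs _ (by have := pvCharClass_le_two c; omega)]
  congr 1; have := pvCharClass_le_two c; omega

theorem pvF_append (xs ys : List Char) : pvF (xs ++ ys) = min (pvF xs) (pvF ys) := by
  have h := pvF_shift ys (pvF xs) (pvF_le_two xs)
  unfold pvF at *
  rw [List.foldl_append]
  exact h

-- pvMinClass computes pvF of the segment [lo, hi) of l.
theorem pvMinClass_eq_pvF (l : List Char) (n lo hi : Nat) (hn : hi - lo = n)
    (hlt : lo < hi) (hle : hi ≤ l.length) :
    pvMinClass l lo hi = pvF ((l.drop lo).take (hi - lo)) := by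
  induction n using Nat.strong_induction_on generalizing lo hi with
  | _ n ih =>
    rw [pvMinClass]
    by_cases h1 : hi - lo ≤ 1
    · have hhi : hi = lo + 1 := by omega
      have hlo : lo < l.length := by omega
      have e1 : lo + 1 - lo = 1 := by omega
      have hseg : (l.drop lo).take (lo + 1 - lo) = [l[lo]] := by
        rw [e1, List.drop_eq_getElem_cons hlo, List.take_succ_cons, List.take_zero]
      rw [if_pos h1, hhi, hseg]
      have h2 : pvF [l[lo]] = pvCharClass l[lo] := by
        have := pvCharClass_le_two l[lo]
        unfold pvF; simp; omega
      rw [h2, List.getD_eq_getElem?_getD, List.getElem?_eq_getElem hlo]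
      rfl
    · rw [if_neg h1]
      have hm1 : lo < (lo + hi) / 2 := by omega
      have hm2 : (lo + hi) / 2 < hi := by omega
      rw [ih ((lo + hi) / 2 - lo) (by omega) lo _ rfl hm1 (by omega),
          ih (hi - (lo + hi) / 2) (by omega) _ hi rfl hm2 hle]
      have harith : hi - lo = ((lo + hi) / 2 - lo) + (hi - (lo + hi) / 2) := by omega
      have hmid : lo + ((lo + hi) / 2 - lo) = (lo + hi) / 2 := by omega
      rw [harith, List.take_add, List.drop_drop, hmid, pvF_append]

-- Characterisations of the class-min in terms of the thresholds.
theorem pvF_eq_zero (xs : List Char) :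
    (pvF xs = 0) ↔ xs.any (fun c => decide (c.toNat < 59)) = true := by
  induction xs with
  | nil => simp [pvF]
  | cons c xs ih =>
    rw [pvF_cons, List.any_cons, Bool.or_eq_true, ← ih]
    simp only [decide_eq_true_eq, ← pvCharClass_eq_zero]
    omega

theorem pvF_eq_two (xs : List Char) :
    (pvF xs = 2) ↔ xs.all (fun c => decide (64 ≤ c.toNat)) = true := by
  induction xs with
  | nil => simp [pvF]
  | cons c xs ih =>
    rw [pvF_cons, List.all_cons, Bool.and_eq_true, ← ih]
    simp only [decide_eq_true_eq, ← pvCharClass_eq_two]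
    have hc := pvCharClass_le_two c
    have hf := pvF_le_two xs
    omega

-- A's min-fold compared with thresholds ↔ any/all predicate scans.
theorem foldMin_lt (cs : List Char) (a : Nat) (k : Nat) :
    decide (cs.foldl (fun m d => min m d.toNat) a < k)
      = (decide (a < k) || cs.any (fun c => decide (c.toNat < k))) := by
  induction cs generalizing a with
  | nil => simp
  | cons c cs ih =>
    rw [List.foldl_cons, ih, List.any_cons]
    simp only [min_lt_iff, Bool.decide_or, Bool.or_assoc]

theorem foldMin_ge (cs : List Char) (a : Nat) (k : Nat) :
    decide (k ≤ cs.foldl (fun m d => min m d.toNat) a)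
      = (decide (k ≤ a) && cs.all (fun c => decide (k ≤ c.toNat))) := by
  induction cs generalizing a with
  | nil => simp
  | cons c cs ih =>
    rw [List.foldl_cons, ih, List.all_cons]
    simp only [le_min_iff, Bool.decide_and, Bool.and_assoc]

-- ===== VERDICT (by name: the statement is the Claim_ definition above) =====
theorem detect_quality_encoding_py_spec : Claim_equal_detect_quality_encoding_py := by
  intro q _
  unfold Spec_detect_quality_encoding_py detect_quality_encoding_py detect_quality_encoding_py_alt
  cases h : q.toList with
  | nil => simp
  | cons c cs =>
    simp only [List.isEmpty_cons, Bool.false_eq_true, if_false]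
    have hlen : 0 < (c :: cs).length := by simp
    rw [pvMinClass_eq_pvF (c :: cs) (c :: cs).length 0 (c :: cs).length rfl hlen (le_refl _)]
    simp only [List.drop_zero, Nat.sub_zero, List.take_length]
    set m := cs.foldl (fun m d => min m d.toNat) c.toNat with hm
    have hany : decide (m < 59) = (c :: cs).any (fun x => decide (x.toNat < 59)) := by
      rw [hm, foldMin_lt, List.any_cons]
    have hall : decide (64 ≤ m) = (c :: cs).all (fun x => decide (64 ≤ x.toNat)) := by
      rw [hm, foldMin_ge, List.all_cons]
    by_cases h1 : m < 59
    · have : pvF (c :: cs) = 0 := by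
        rw [pvF_eq_zero, ← hany]; simp [h1]
      rw [if_pos h1, this]; rfl
    · have hne0 : pvF (c :: cs) ≠ 0 := by
        rw [Ne, pvF_eq_zero, ← hany]; simp [h1]
      rw [if_neg h1]
      by_cases h2 : 64 ≤ m
      · have : pvF (c :: cs) = 2 := by
          rw [pvF_eq_two, ← hall]; simp [h2]
        rw [if_pos h2, this]; rfl
      · have hne2 : pvF (c :: cs) ≠ 2 := by
          rw [Ne, pvF_eq_two, ← hall]; simp [h2]
        have := pvF_le_two (c :: cs)
        have h1' : pvF (c :: cs) = 1 := by omega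
        rw [if_neg h2, h1']; rfl
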